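-- pv_equiv track=rewrite | github.com/FDlucifer/offensive-go-python-rust | leetcode-python-go/2178. 拆分成最多数目的正偶数之和/main.py | maximumEvenSplit
-- ===== SOURCE A (Python) =====
-- from typing import List
--
-- def maximumEvenSplit(finalSum: int) -> List[int]:
--     if finalSum % 2 != 0:
--         return []
--
--     result = []
--     k = 2
--     max_sum = 0
--     while max_sum < finalSum:
--         max_sum += k
--         k += 2
--
--     diff = max_sum - finalSum
--     for i in range(2, k, 2):
--         if i != diff:
--             result.append(i)
--
--     return result
-- ===== SOURCE B (Python) =====
-- from typing import List
--
-- def maximumEvenSplit(finalSum: int) -> List[int]: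
--     if finalSum % 2 != 0:
--         return []
--     # binary search for the smallest n >= 0 with n*(n+1) >= finalSum
--     lo, hi = 0, (finalSum if finalSum > 0 else 0)
--     while lo < hi:
--         mid = (lo + hi) // 2
--         if mid * (mid + 1) >= finalSum:
--             hi = mid
--         else:
--             lo = mid + 1
--     diff = lo * (lo + 1) - finalSum
--     return [x for x in range(2, 2 * lo + 1, 2) if x != diff]
-- ===== Notes on version B (the rewrite author's own statement) =====
-- stated objective: faster
-- what changed: Replaces A's linear accumulation loop (adding 2,4,6,... until the running sum reaches finalSum) with a binary search for the least n with n*(n+1) >= finalSum, then emits the evens 2..2n skipping the overshoot.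
import Mathlib
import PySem

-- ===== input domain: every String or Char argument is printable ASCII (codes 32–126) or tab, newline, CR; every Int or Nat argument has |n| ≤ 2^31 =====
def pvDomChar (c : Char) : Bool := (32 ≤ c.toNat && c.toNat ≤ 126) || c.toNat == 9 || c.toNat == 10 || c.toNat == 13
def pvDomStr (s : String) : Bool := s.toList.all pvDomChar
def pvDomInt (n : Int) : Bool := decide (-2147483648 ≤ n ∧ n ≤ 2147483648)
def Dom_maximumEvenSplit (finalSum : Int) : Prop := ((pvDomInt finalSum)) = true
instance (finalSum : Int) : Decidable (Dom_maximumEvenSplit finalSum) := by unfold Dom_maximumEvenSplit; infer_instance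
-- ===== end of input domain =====

-- B replaces A's linear accumulation loop (find the least n with n*(n+1) ≥ finalSum by adding
-- 2,4,6,… one at a time) by a binary search for that n (fewer loop iterations by design;
-- wall-clock difference was below a timing run's resolution).

-- ===== PORT A =====
-- A's while-loop: state (max_sum, k); fuel only makes the recursion total (finalSum.toNat + 1
-- iterations always suffice since max_sum grows by k ≥ 2 each step).
def pvLoopA : Nat → Int → Int → Int → Int × Int
  | 0, _, max_sum, k => (max_sum, k)
  | fuel + 1, finalSum, max_sum, k =>
      if max_sum < finalSum then pvLoopA fuel finalSum (max_sum + k) (k + 2)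
      else (max_sum, k)

def maximumEvenSplit (finalSum : Int) : List Int :=
  if PySem.Int.mod finalSum 2 ≠ 0 then []
  else
    let p := pvLoopA (finalSum.toNat + 1) finalSum 0 2
    let diff := p.1 - finalSum
    -- for i in range(2, k, 2): if i != diff: result.append(i)
    (PySem.List.pyRange 2 p.2 2).foldl (fun result i => if i ≠ diff then result ++ [i] else result) []

-- ===== PORT B =====
-- B's while-loop: binary search on [lo, hi]; fuel only makes it total (the interval shrinks
-- each step, so finalSum.toNat + 1 iterations always suffice).
def pvLoopB : Nat → Int → Int → Int → Int
  | 0, _, lo, _ => lo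
  | fuel + 1, finalSum, lo, hi =>
      if lo < hi then
        let mid := PySem.Int.floordiv (lo + hi) 2
        if mid * (mid + 1) ≥ finalSum then pvLoopB fuel finalSum lo mid
        else pvLoopB fuel finalSum (mid + 1) hi
      else lo

def maximumEvenSplit_alt (finalSum : Int) : List Int :=
  if PySem.Int.mod finalSum 2 ≠ 0 then []
  else
    let lo := pvLoopB (finalSum.toNat + 1) finalSum 0 (if finalSum > 0 then finalSum else 0)
    let diff := lo * (lo + 1) - finalSum
    (PySem.List.pyRange 2 (2 * lo + 1) 2).filter (fun x => x ≠ diff)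

-- ===== PRECONDITION & SPEC =====
def Spec_maximumEvenSplit (finalSum : Int) (out : List Int) : Prop := out = maximumEvenSplit_alt finalSum
instance (finalSum : Int) (out : List Int) : Decidable (Spec_maximumEvenSplit finalSum out) := by unfold Spec_maximumEvenSplit; infer_instance

-- ===== CLAIM (what is proved, stated in full; the proofs are below) =====
def Claim_equal_maximumEvenSplit : Prop := ∀ (finalSum : Int), Dom_maximumEvenSplit finalSum → Spec_maximumEvenSplit finalSum (maximumEvenSplit finalSum)

-- ===== LEMMAS AND PROOFS =====

-- A's loop, started at stage m (max_sum = m*(m+1), k = 2*m+2), stops exactly at the least n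
-- with finalSum ≤ n*(n+1).
theorem pvLoopA_eq (S n : Int) (hn : 0 ≤ n) (hS : S ≤ n * (n + 1))
    (hmin : ∀ j : Int, 0 ≤ j → j < n → j * (j + 1) < S) :
    ∀ (fuel : Nat) (m : Int), 0 ≤ m → m ≤ n → (n - m).toNat ≤ fuel →
      pvLoopA fuel S (m * (m + 1)) (2 * m + 2) = (n * (n + 1), 2 * n + 2) := by
  intro fuel
  induction fuel with
  | zero =>
    intro m hm0 hmn hfuel
    have : m = n := by omega
    subst this
    simp [pvLoopA]
  | succ fuel ih =>
    intro m hm0 hmn hfuel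
    by_cases hlt : m * (m + 1) < S
    · have hmltn : m < n := by nlinarith
      have step : m * (m + 1) + (2 * m + 2) = (m + 1) * ((m + 1) + 1) := by ring
      have step2 : (2 * m + 2) + 2 = 2 * (m + 1) + 2 := by ring
      simp only [pvLoopA, if_pos hlt, step, step2]
      exact ih (m + 1) (by omega) (by omega) (by omega)
    · have : ¬ m < n := fun h => hlt (hmin m hm0 h)
      have : m = n := by omega
      subst this
      simp [pvLoopA, hlt]

-- B's binary search converges to the same least n.
theorem pvLoopB_eq (S n : Int) (hS : S ≤ n * (n + 1))
    (hmin : ∀ j : Int, 0 ≤ j → j < n → j * (j + 1) < S) :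
    ∀ (fuel : Nat) (lo hi : Int), 0 ≤ lo → lo ≤ n → n ≤ hi → (hi - lo).toNat ≤ fuel →
      pvLoopB fuel S lo hi = n := by
  intro fuel
  induction fuel with
  | zero =>
    intro lo hi hlo0 hlon hnhi hfuel
    have : lo = n := by omega
    simp [pvLoopB, this]
  | succ fuel ih =>
    intro lo hi hlo0 hlon hnhi hfuel
    by_cases hlh : lo < hi
    · have hmid_lo : lo ≤ PySem.Int.floordiv (lo + hi) 2 :=
        (PySem.Int.le_floordiv_iff_mul_le (by omega)).2 (by omega)
      have hmid_hi : PySem.Int.floordiv (lo + hi) 2 < hi :=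
        (PySem.Int.floordiv_lt_iff_lt_mul (by omega)).2 (by omega)
      set mid := PySem.Int.floordiv (lo + hi) 2 with hmid
      by_cases hge : mid * (mid + 1) ≥ S
      · have hnmid : n ≤ mid := by
          by_contra h
          exact absurd (hmin mid (by omega) (by omega)) (by omega)
        simp only [pvLoopB, if_pos hlh, ← hmid, if_pos hge]
        exact ih lo mid hlo0 hlon hnmid (by omega)
      · have hmidn : mid < n := by
          by_contra h
          push Not at h
          have : n * (n + 1) ≤ mid * (mid + 1) := by nlinarith
          omega
        simp only [pvLoopB, if_pos hlh, ← hmid, if_neg hge]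
        exact ih (mid + 1) hi (by omega) (by omega) hnhi (by omega)
    · have h1 : lo = n := by omega
      have h2 : hi = n := by omega
      subst h1; subst h2
      simp [pvLoopB]

-- The two half-open even ranges range(2, 2n+2, 2) and range(2, 2n+1, 2) are the same list.
theorem pyRange_even_eq (n : Int) (hn : 0 ≤ n) :
    PySem.List.pyRange 2 (2 * n + 2) 2 = PySem.List.pyRange 2 (2 * n + 1) 2 := by
  rw [PySem.List.pyRange_of_pos _ _ (by omega : (0:Int) < 2),
      PySem.List.pyRange_of_pos _ _ (by omega : (0:Int) < 2)]
  congr 1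
  by_cases h : (0:Int) < n
  · rw [if_pos (by omega), if_pos (by omega)]
    congr 1
    have e1 : 2 * n + 2 - 2 + 2 - 1 = 2 * n + 1 := by ring
    have e2 : 2 * n + 1 - 2 + 2 - 1 = 2 * n := by ring
    rw [e1, e2]
    omega
  · have : n = 0 := by omega
    subst this
    norm_num

-- ===== VERDICT (by name: the statement is the Claim_ definition above) =====
theorem maximumEvenSplit_spec : Claim_equal_maximumEvenSplit := by
  unfold Claim_equal_maximumEvenSplit Spec_maximumEvenSplit
  intro S _
  unfold maximumEvenSplit maximumEvenSplit_alt
  by_cases hodd : PySem.Int.mod S 2 ≠ 0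
  · simp only [if_pos hodd]
  · simp only [if_neg hodd]
    by_cases hS0 : S ≤ 0
    · -- finalSum ≤ 0: both loops are immediate, both ranges empty
      have ht : S.toNat = 0 := by omega
      have hneg : ¬ S > 0 := by omega
      have hnlt : ¬ (0:Int) < S := by omega
      have r1 : PySem.List.pyRange 2 2 2 = ([] : List Int) := by decide
      have r2 : PySem.List.pyRange 2 1 2 = ([] : List Int) := by decide
      simp [hneg, pvLoopA, pvLoopB, r1, r2]
    · have hS0 : 0 < S := by omega
      -- finalSum ≥ 1: both loops produce the least n with S ≤ n*(n+1)
      have hex : ∃ k : Nat, S ≤ (k : Int) * ((k : Int) + 1) := by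
        refine ⟨S.toNat, ?_⟩
        have : (S.toNat : Int) = S := by omega
        nlinarith
      classical
      let N := Nat.find hex
      have hNs : S ≤ (N : Int) * ((N : Int) + 1) := Nat.find_spec hex
      have hNmin : ∀ j : Int, 0 ≤ j → j < (N : Int) → j * (j + 1) < S := by
        intro j hj0 hjN
        have hje : (j.toNat : Int) = j := by omega
        have hjN' : j.toNat < N := by omega
        have hmin' := Nat.find_min hex hjN'
        rw [hje] at hmin'
        omega
      have hNleS : (N : Int) ≤ S := by
        have : N ≤ S.toNat := Nat.find_min' hex (by
          have : (S.toNat : Int) = S := by omega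
          nlinarith)
        omega
      have hA : pvLoopA (S.toNat + 1) S 0 2 = ((N : Int) * ((N : Int) + 1), 2 * (N : Int) + 2) := by
        have := pvLoopA_eq S (N : Int) (by omega) hNs hNmin (S.toNat + 1) 0
          (le_refl 0) (by omega) (by omega)
        simpa using this
      have hB : pvLoopB (S.toNat + 1) S 0 (if S > 0 then S else 0) = (N : Int) := by
        rw [if_pos hS0]
        exact pvLoopB_eq S (N : Int) hNs hNmin (S.toNat + 1) 0 S (le_refl 0) (by omega) hNleS (by omega)
      simp only [hA, hB]
      rw [show (2 : Int) * (N : Int) + 2 = 2 * (N : Int) + 2 from rfl,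
          pyRange_even_eq (N : Int) (by omega)]
      rw [PySem.List.foldl_append_ite_eq_filter]
      simp
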